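-- pv_equiv track=rewrite | github.com/hpnhxxwn/AI | foundations/submission.py | mutateSentences
-- ===== SOURCE A (Python) =====
-- def search_sentence(cur_word, cur_sentence, sentence_len, D, collection):
--     if sentence_len == len(cur_sentence) + 1:
--         collection.add(' '.join(cur_sentence + [cur_word]))
--     elif sentence_len > len(cur_sentence)+1 and cur_word in D:
--         for next_word in D[cur_word]:
--             search_sentence(next_word, cur_sentence + [cur_word], sentence_len, D, collection)
--
-- def mutateSentences(sentence):
--     """
--     High-level idea: generate sentences similar to a given sentence.
--     Given a sentence (sequence of words), return a list of all possible
--     alternative sentences of the same length, where each pair of adjacent words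
--     also occurs in the original sentence. (The words within each pair should appear
--     in the same order in the output sentence as they did in the orignal sentence.)
--     Notes:
--     - The order of the sentences you output doesn't matter.
--     - You must not output duplicates.
--     - Your generated sentence can use a word in the original sentence more than
--       once.
--     """
--     # BEGIN_YOUR_CODE (our solution is 20 lines of code, but don't worry if you deviate from this)
--     words = sentence.split()
--     D = {}
--     collection = set()
--     #create a dictionary with the key being the previous words and content be its next possibility
--     for i in range(len(words)-1):
--         if words[i] in D:
--             D[words[i]].append(words[i+1])
--         else:
--             D[words[i]] = [words[i+1]]
--     ##exhaustive search
--     for word in D: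
--         D[word] = list(set(D[word]))
--
--     for word in D:
--         search_sentence(word, [], len(words), D, collection)
--
--     return(collection)
-- ===== SOURCE B (Python) =====
-- def mutateSentences(sentence):
--     words = sentence.split()
--     D = {}
--     for u, v in zip(words, words[1:]):
--         D.setdefault(u, set()).add(v)
--     frontier = [[w] for w in D]
--     for _ in range(len(words) - 1):
--         frontier = [p + [v] for p in frontier for v in D.get(p[-1], ())]
--     return {' '.join(p) for p in frontier}
-- ===== Notes on version B (the rewrite author's own statement) =====
-- stated objective: alternative
-- what changed: A enumerates sentences by depth-first recursion (search_sentence) growing a prefix word by word; B builds the same adjacency map and then extends a breadth-first frontier of partial sentences in len(words)-1 rounds, joining the final frontier into the result set.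
import Mathlib
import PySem

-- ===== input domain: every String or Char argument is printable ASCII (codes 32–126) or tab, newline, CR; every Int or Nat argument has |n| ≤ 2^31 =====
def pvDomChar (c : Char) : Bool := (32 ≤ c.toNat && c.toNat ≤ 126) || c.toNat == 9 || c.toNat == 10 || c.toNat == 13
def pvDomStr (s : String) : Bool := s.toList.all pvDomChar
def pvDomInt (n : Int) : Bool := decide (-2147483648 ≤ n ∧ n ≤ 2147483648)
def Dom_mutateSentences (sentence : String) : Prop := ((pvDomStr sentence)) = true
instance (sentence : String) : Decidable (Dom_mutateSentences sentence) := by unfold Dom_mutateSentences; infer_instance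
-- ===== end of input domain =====

-- B replaces A's depth-first recursion by breadth-first frontier extension (a different
-- decomposition of the same enumeration); objective: alternative, no speed claim.

-- ===== PORT A =====
-- A's recursive search: searchSentence plus its for-loop written as the structural
-- recursion searchLoop over the successor list.
mutual
def searchSentence (cur_word : String) (cur_sentence : List String) (sentence_len : Int)
    (D : PySem.Dict String (List String)) (collection : PySem.Set String) : PySem.Set String :=
  if sentence_len = PySem.List.len cur_sentence + 1 then
    PySem.Set.add collection (PySem.Str.join " " (cur_sentence ++ [cur_word]))
  else if _h : sentence_len > PySem.List.len cur_sentence + 1 ∧ D.contains cur_word then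
    searchLoop (D.getD cur_word []) (cur_sentence ++ [cur_word]) sentence_len D collection
  else collection
termination_by ((sentence_len - cur_sentence.length).toNat, 0)
decreasing_by
  simp only [PySem.List.len_eq] at _h
  refine Prod.Lex.left _ _ ?_
  simp only [List.length_append, List.length_cons, List.length_nil]
  omega

def searchLoop (next_words : List String) (cur_sentence : List String) (sentence_len : Int)
    (D : PySem.Dict String (List String)) (collection : PySem.Set String) : PySem.Set String :=
  match next_words with
  | [] => collection
  | v :: rest => searchLoop rest cur_sentence sentence_len D
      (searchSentence v cur_sentence sentence_len D collection)
termination_by ((sentence_len - cur_sentence.length).toNat, next_words.length + 1)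
decreasing_by
  all_goals exact Prod.Lex.right _ (by simp only [List.length_cons]; omega)
end

def mutateSentences (sentence : String) : List String :=
  let words := PySem.Str.split₀ sentence
  -- build the adjacency dict of successor lists
  let D := (PySem.List.pyRange 0 (PySem.List.len words - 1) 1).foldl (fun d i =>
      if d.contains (PySem.List.pyGetD words i "") then
        d.insert (PySem.List.pyGetD words i "")
          (d.getD (PySem.List.pyGetD words i "") [] ++ [PySem.List.pyGetD words (i + 1) ""])
      else
        d.insert (PySem.List.pyGetD words i "") [PySem.List.pyGetD words (i + 1) ""])
    PySem.Dict.empty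
  -- D[word] = list(set(D[word]))
  let D := D.keys.foldl (fun d w => d.insert w (PySem.Set.ofList (d.getD w []))) D
  D.keys.foldl (fun coll w => searchSentence w [] (PySem.List.len words) D coll) PySem.Set.empty

-- ===== PORT B =====
def mutateSentences_alt (sentence : String) : List String :=
  let words := PySem.Str.split₀ sentence
  let D := (words.zip words.tail).foldl
      (fun d p => d.modify p.1 PySem.Set.empty (fun s => PySem.Set.add s p.2)) PySem.Dict.empty
  let seeds := D.keys.map (fun w => [w])
  let frontier := (PySem.List.pyRange 0 (PySem.List.len words - 1) 1).foldl (fun fr _ =>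
      fr.flatMap (fun p =>
        match PySem.List.pyGet? p (-1) with   -- p[-1]; frontier paths are never empty
        | some u => (D.getD u PySem.Set.empty).map (fun v => p ++ [v])
        | none => []))
    seeds
  PySem.Set.ofList (frontier.map (fun p => PySem.Str.join " " p))

-- ===== PRECONDITION & SPEC =====
def Spec_mutateSentences (sentence : String) (out : List String) : Prop := out = mutateSentences_alt sentence
instance (sentence : String) (out : List String) : Decidable (Spec_mutateSentences sentence out) := by unfold Spec_mutateSentences; infer_instance

-- ===== CLAIM (what is proved, stated in full; the proofs are below) =====
def Claim_equal_mutateSentences : Prop := ∀ (sentence : String), Dom_mutateSentences sentence → Spec_mutateSentences sentence (mutateSentences sentence)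

-- ===== LEMMAS AND PROOFS =====

-- All completed paths of length k+1 that A's recursion explores from word w
-- (front recursion) / that B's frontier rounds build from seed [w] (back extension).
def pvCompl (D : PySem.Dict String (List String)) : Nat → String → List (List String)
  | 0, w => [[w]]
  | k+1, w =>
      if D.contains w then (D.getD w []).flatMap (fun v => (pvCompl D k v).map (w :: ·))
      else []

-- B's one-path extension step (the body of B's inner comprehension).
def pvExt (D : PySem.Dict String (List String)) (p : List String) : List (List String) :=
  match PySem.List.pyGet? p (-1) with
  | some u => (D.getD u PySem.Set.empty).map (fun v => p ++ [v])
  | none => []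

-- A's first loop, A's dedup pass, and B's dict build, as standalone values of words
def pvD1 (ws : List String) : PySem.Dict String (List String) :=
  (PySem.List.pyRange 0 (PySem.List.len ws - 1) 1).foldl (fun d i =>
      if d.contains (PySem.List.pyGetD ws i "") then
        d.insert (PySem.List.pyGetD ws i "")
          (d.getD (PySem.List.pyGetD ws i "") [] ++ [PySem.List.pyGetD ws (i + 1) ""])
      else
        d.insert (PySem.List.pyGetD ws i "") [PySem.List.pyGetD ws (i + 1) ""]) PySem.Dict.empty

def pvDA (ws : List String) : PySem.Dict String (List String) :=
  (pvD1 ws).keys.foldl (fun d w => d.insert w (PySem.Set.ofList (d.getD w []))) (pvD1 ws)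

def pvDB (ws : List String) : PySem.Dict String (List String) :=
  (ws.zip ws.tail).foldl
    (fun d p => d.modify p.1 PySem.Set.empty (fun s => PySem.Set.add s p.2)) PySem.Dict.empty

-- A's if/else append step IS dict.modify with append.
theorem pv_stepA_eq_modify (d : PySem.Dict String (List String)) (u v : String) :
    (if d.contains u then d.insert u (d.getD u [] ++ [v]) else d.insert u [v])
      = d.modify u [] (fun l => l ++ [v]) := by
  by_cases h : d.contains u
  · simp [h, PySem.Dict.modify]
  · simp only [Bool.not_eq_true] at h
    simp [h, PySem.Dict.modify, PySem.Dict.getD_of_not_contains d _ h]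

theorem pv_zip_idx (ws : List String) :
    (List.range (ws.length - 1)).map (fun k => (ws.getD k "", ws.getD (k+1) "")) = ws.zip ws.tail := by
  induction ws with
  | nil => rfl
  | cons a t ih =>
    cases t with
    | nil => rfl
    | cons b t2 =>
      simp only [List.length_cons, Nat.add_sub_cancel, List.range_succ_eq_map, List.map_cons,
        List.map_map, List.tail_cons, List.zip_cons_cons]
      refine congrArg₂ List.cons rfl ?_
      simp only [List.length_cons, Nat.add_sub_cancel, List.tail_cons] at ih
      rw [← ih]
      apply List.map_congr_left
      intro k _
      simp [List.getD]

-- the index pairs A reads are exactly zip words (tail words)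
theorem pv_pairs_eq (ws : List String) :
    (PySem.List.pyRange 0 (PySem.List.len ws - 1) 1).map
        (fun i => (PySem.List.pyGetD ws i "", PySem.List.pyGetD ws (i + 1) ""))
      = ws.zip ws.tail := by
  rw [PySem.List.pyRange_one, List.map_map, ← pv_zip_idx]
  have h1 : (PySem.List.len ws - 1 - 0).toNat = ws.length - 1 := by
    simp [PySem.List.len_eq]
  rw [h1]
  apply List.map_congr_left
  intro k _
  simp only [Function.comp_apply, zero_add]
  rw [PySem.List.pyGetD_natCast]
  have h2 : ((k:Int) + 1) = ((k+1 : Nat) : Int) := by push_cast; ring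
  rw [h2, PySem.List.pyGetD_natCast]

-- value of B's dict-of-sets build loop
theorem pv_getD_foldl_modify_add (l : List (String × String)) :
    ∀ (d : PySem.Dict String (List String)) (c : String),
    (l.foldl (fun d p => d.modify p.1 PySem.Set.empty (fun s => PySem.Set.add s p.2)) d).getD c PySem.Set.empty
      = PySem.Set.update (d.getD c PySem.Set.empty) ((l.filter (fun p => p.1 == c)).map (·.2)) := by
  induction l with
  | nil => intro d c; simp [PySem.Set.update]
  | cons p t ih =>
    intro d c
    rw [List.foldl_cons, ih]
    by_cases h : p.1 = c
    · simp [h, PySem.Set.update_cons]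
    · simp [h, PySem.Dict.getD_modify, Ne.symm h]

-- value of A's rewrite pass (each key overwritten exactly once)
theorem pv_getD_foldl_insert_once (l : List String) :
    ∀ (d : PySem.Dict String (List String)), l.Nodup →
    ∀ (g : List String → List String) (k : String) (dflt : List String),
    ((l.foldl (fun d w => d.insert w (g (d.getD w dflt))) d).getD k dflt)
      = if k ∈ l then g (d.getD k dflt) else d.getD k dflt := by
  induction l with
  | nil => intro d _ g k dflt; simp
  | cons w t ih =>
    intro d hnd g k dflt
    rw [List.foldl_cons, ih _ (List.nodup_cons.mp hnd).2]
    by_cases hk : k ∈ t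
    · have hkw : k ≠ w := fun h => (List.nodup_cons.mp hnd).1 (h ▸ hk)
      simp [hk, hkw, PySem.Dict.getD_insert]
    · by_cases hkw : k = w
      · simp [hkw, (List.nodup_cons.mp hnd).1]
      · simp [hk, hkw, PySem.Dict.getD_insert]

theorem pv_set_update_self (s : PySem.Set String) : PySem.Set.update s s = s := by
  rw [PySem.Set.update_eq_append_filter]
  have h : (PySem.Set.ofList s).filter (fun y => !(PySem.Set.contains s y)) = [] := by
    apply List.filter_eq_nil_iff.mpr
    intro y hy
    simp [(PySem.List.mem_dedup s y).mp hy]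
  rw [h, List.append_nil]

-- the two adjacency dicts coincide
theorem pv_dicts_eq (ws : List String) : pvDA ws = pvDB ws := by
  unfold pvDA pvD1 pvDB
  have hbody : (fun (d : PySem.Dict String (List String)) (i : Int) =>
      if d.contains (PySem.List.pyGetD ws i "") then
        d.insert (PySem.List.pyGetD ws i "")
          (d.getD (PySem.List.pyGetD ws i "") [] ++ [PySem.List.pyGetD ws (i + 1) ""])
      else
        d.insert (PySem.List.pyGetD ws i "") [PySem.List.pyGetD ws (i + 1) ""])
      = fun d i => d.modify (PySem.List.pyGetD ws i "") [] (· ++ [PySem.List.pyGetD ws (i + 1) ""]) := by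
    funext d i
    exact pv_stepA_eq_modify d _ _
  rw [hbody]
  have hfold : (PySem.List.pyRange 0 (PySem.List.len ws - 1) 1).foldl
      (fun d i => d.modify (PySem.List.pyGetD ws i "") [] (· ++ [PySem.List.pyGetD ws (i + 1) ""]))
      PySem.Dict.empty
      = (ws.zip ws.tail).foldl (fun d p => d.modify p.1 [] (· ++ [p.2])) PySem.Dict.empty := by
    rw [← pv_pairs_eq ws, List.foldl_map]
  rw [hfold]
  set ps := ws.zip ws.tail with hps
  set d1 := ps.foldl (fun d p => d.modify p.1 [] (· ++ [p.2])) PySem.Dict.empty with hd1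
  have hk1 : d1.keys = PySem.Set.ofList (ps.map (·.1)) := by
    rw [hd1, PySem.Dict.keys_foldl_modify_key]
    simp [PySem.Set.update_nil_left]
  have hnd1 : d1.keys.Nodup := by
    rw [hd1]
    exact PySem.Dict.nodup_keys_foldl_modify_key _ _ _ _ _ PySem.Dict.nodup_keys_empty
  set DB := ps.foldl (fun d p => d.modify p.1 PySem.Set.empty (fun s => PySem.Set.add s p.2)) PySem.Dict.empty with hDB
  have hkB : DB.keys = PySem.Set.ofList (ps.map (·.1)) := by
    rw [hDB, PySem.Dict.keys_foldl_modify_key]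
    simp [PySem.Set.update_nil_left]
  have hndB : DB.keys.Nodup := by
    rw [hDB]
    exact PySem.Dict.nodup_keys_foldl_modify_key _ _ _ _ _ PySem.Dict.nodup_keys_empty
  set DA := d1.keys.foldl (fun d w => d.insert w (PySem.Set.ofList (d.getD w []))) d1 with hDA
  have hkA : DA.keys = d1.keys := by
    rw [hDA, PySem.Dict.keys_foldl_insert, pv_set_update_self]
  have hndA : DA.keys.Nodup := by rw [hkA]; exact hnd1
  apply PySem.Dict.ext
  rw [PySem.Dict.items_eq_map_keys DA hndA [], PySem.Dict.items_eq_map_keys DB hndB [],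
    hkA, hk1, ← hkB, hkB]
  apply List.map_congr_left
  intro k hkmem
  refine congrArg₂ Prod.mk rfl ?_
  have hgA : DA.getD k [] = PySem.Set.ofList (d1.getD k []) := by
    rw [hDA, pv_getD_foldl_insert_once d1.keys d1 hnd1 _ k []]
    rw [hk1] at *
    simp [hkmem]
  have hg1 : d1.getD k [] = (ps.filter (fun p => p.1 == k)).map (·.2) := by
    rw [hd1, PySem.Dict.getD_foldl_modify_append]
    simp
  have hgB : DB.getD k [] = PySem.Set.ofList ((ps.filter (fun p => p.1 == k)).map (·.2)) := by
    rw [hDB]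
    have := pv_getD_foldl_modify_add ps PySem.Dict.empty k
    simpa [PySem.Set.update_nil_left] using this
  rw [hgA, hg1, hgB]

theorem pv_searchLoop_eq (l : List String) (s : List String) (n : Int)
    (D : PySem.Dict String (List String)) :
    ∀ (coll : PySem.Set String),
    searchLoop l s n D coll = l.foldl (fun c v => searchSentence v s n D c) coll := by
  induction l with
  | nil => intro coll; rw [searchLoop]; rfl
  | cons v rest ih => intro coll; rw [searchLoop, ih, List.foldl_cons]

theorem pv_compl_ne_nil (D : PySem.Dict String (List String)) (k : Nat) (w : String) :
    ∀ p ∈ pvCompl D k w, p ≠ [] := by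
  cases k with
  | zero => intro p hp; simp [pvCompl] at hp; simp [hp]
  | succ k =>
    intro p hp
    simp only [pvCompl] at hp
    split at hp
    · simp only [List.mem_flatMap, List.mem_map] at hp
      obtain ⟨v, _, q, _, rfl⟩ := hp
      simp
    · simp at hp

theorem pv_getLast?_cons (w : String) (p : List String) (hp : p ≠ []) :
    (w :: p).getLast? = p.getLast? := by
  cases p with
  | nil => exact absurd rfl hp
  | cons b t => simp [List.getLast?_cons_cons]

theorem pv_ext_cons (D : PySem.Dict String (List String)) (w : String) (p : List String) (hp : p ≠ []) :
    pvExt D (w :: p) = (pvExt D p).map (w :: ·) := by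
  unfold pvExt
  rw [PySem.List.pyGet?_neg_one, PySem.List.pyGet?_neg_one, pv_getLast?_cons w p hp]
  cases h : p.getLast? with
  | none => rw [List.getLast?_eq_none_iff] at h; exact absurd h hp
  | some u => simp [List.map_map, Function.comp_def]

-- extending every completed path of length k+1 at the back gives those of length k+2
theorem pv_flatMap_ext (D : PySem.Dict String (List String)) (k : Nat) :
    ∀ (w : String), (pvCompl D k w).flatMap (pvExt D) = pvCompl D (k+1) w := by
  induction k with
  | zero =>
    intro w
    show pvExt D [w] ++ [] = _
    rw [List.append_nil]
    unfold pvExt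
    rw [PySem.List.pyGet?_neg_one]
    simp only [List.getLast?_singleton]
    by_cases h : D.contains w
    · simp only [pvCompl, h, if_true]
      show List.map (fun v => [w] ++ [v]) (D.getD w []) = _
      simp only [List.singleton_append, List.map_cons, List.map_nil]
      rw [← List.map_eq_flatMap]
    · simp only [Bool.not_eq_true] at h
      simp only [pvCompl, h, Bool.false_eq_true, if_false]
      rw [PySem.Dict.getD_of_not_contains D _ h]
      rfl
  | succ k ih =>
    intro w
    by_cases h : D.contains w
    · show (pvCompl D (k+1) w).flatMap (pvExt D) = pvCompl D (k+2) w
      conv_lhs => rw [pvCompl, if_pos h]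
      rw [List.flatMap_assoc]
      conv_rhs => rw [pvCompl, if_pos h]
      apply List.flatMap_congr
      intro v _
      rw [List.flatMap_map]
      have hcongr : ∀ p ∈ pvCompl D k v, (fun a => pvExt D (w :: a)) p = ((pvExt D p).map (w :: ·)) := by
        intro p hp
        exact pv_ext_cons D w p (pv_compl_ne_nil D k v p hp)
      rw [List.flatMap_congr hcongr]
      rw [← List.map_flatMap, ih v]
    · simp only [Bool.not_eq_true] at h
      show (pvCompl D (k+1) w).flatMap (pvExt D) = pvCompl D (k+2) w
      conv_lhs => rw [pvCompl, if_neg (by simp [h])]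
      conv_rhs => rw [pvCompl, if_neg (by simp [h])]
      rfl

-- B's rounds, level by level
theorem pv_rounds (D : PySem.Dict String (List String)) (r : List Int) :
    ∀ (j : Nat) (ks : List String),
      r.foldl (fun fr _ => fr.flatMap (pvExt D)) (ks.flatMap (fun w => pvCompl D j w))
        = ks.flatMap (fun w => pvCompl D (j + r.length) w) := by
  induction r with
  | nil => intro j ks; simp
  | cons x t ih =>
    intro j ks
    rw [List.foldl_cons]
    have h1 : (ks.flatMap (fun w => pvCompl D j w)).flatMap (pvExt D)
        = ks.flatMap (fun w => pvCompl D (j+1) w) := by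
      rw [List.flatMap_assoc]
      apply List.flatMap_congr
      intro w _
      exact pv_flatMap_ext D j w
    rw [h1, ih (j+1) ks]
    simp only [List.length_cons]
    have he : j + 1 + t.length = j + (t.length + 1) := by omega
    rw [he]

theorem pv_foldl_flatMap {α β γ : Type} (l : List α) (g : α → List γ) (f : β → γ → β) (i : β) :
    (l.flatMap g).foldl f i = l.foldl (fun c v => (g v).foldl f c) i := by
  induction l generalizing i with
  | nil => rfl
  | cons x xs ih => simp [List.flatMap_cons, List.foldl_append, ih]

-- A's recursion collects exactly the joins of the completed paths, in order
theorem pv_searchSentence_eq (D : PySem.Dict String (List String)) (n : Int) :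
    ∀ (k : Nat) (cur : String) (pref : List String) (coll : PySem.Set String),
      n = (pref.length : Int) + 1 + k →
      searchSentence cur pref n D coll
        = ((pvCompl D k cur).map (fun p => PySem.Str.join " " (pref ++ p))).foldl PySem.Set.add coll := by
  intro k
  induction k with
  | zero =>
    intro cur pref coll hn
    rw [searchSentence, if_pos (by simp only [PySem.List.len_eq]; omega)]
    simp [pvCompl]
  | succ k ih =>
    intro cur pref coll hn
    rw [searchSentence, if_neg (by simp only [PySem.List.len_eq]; omega)]
    by_cases h : D.contains cur
    · rw [dif_pos ⟨by simp only [PySem.List.len_eq]; omega, h⟩]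
      rw [pv_searchLoop_eq]
      have hfold : (D.getD cur []).foldl (fun c v => searchSentence v (pref ++ [cur]) n D c) coll
          = (D.getD cur []).foldl (fun c v =>
              ((pvCompl D k v).map (fun p => PySem.Str.join " " ((pref ++ [cur]) ++ p))).foldl PySem.Set.add c) coll := by
        apply List.foldl_ext
        intro c v _
        exact ih v (pref ++ [cur]) c (by simp only [List.length_append, List.length_cons, List.length_nil]; push_cast; omega)
      rw [hfold]
      conv_rhs => rw [pvCompl, if_pos h]
      rw [List.map_flatMap, pv_foldl_flatMap]
      apply List.foldl_ext
      intro c v _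
      rw [List.map_map]
      congr 1
      apply List.map_congr_left
      intro p _
      simp only [Function.comp_apply]
      rw [← List.append_cons]
    · rw [dif_neg (by simp [h])]
      conv_rhs => rw [pvCompl, if_neg (by simp [h])]
      rfl

-- A's start fold = B's joined frontier, for a common dict D
theorem pv_sides (ws : List String) (D : PySem.Dict String (List String))
    (hnil : ws = [] → D.keys = []) :
    D.keys.foldl (fun coll w => searchSentence w [] (PySem.List.len ws) D coll) PySem.Set.empty
      = PySem.Set.ofList
          (((PySem.List.pyRange 0 (PySem.List.len ws - 1) 1).foldl (fun fr _ =>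
              fr.flatMap (fun p =>
                match PySem.List.pyGet? p (-1) with
                | some u => (D.getD u PySem.Set.empty).map (fun v => p ++ [v])
                | none => [])) (D.keys.map (fun w => [w]))).map (fun p => PySem.Str.join " " p)) := by
  have hext : (fun (p : List String) =>
      match PySem.List.pyGet? p (-1) with
      | some u => (D.getD u PySem.Set.empty).map (fun v => p ++ [v])
      | none => []) = pvExt D := rfl
  rw [hext]
  cases hlen : ws.length with
  | zero =>
    have hws : ws = [] := List.length_eq_zero_iff.mp hlen
    rw [hnil hws, hws]
    simp [PySem.Set.empty, PySem.Set.ofList]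
  | succ m =>
    have hseeds : D.keys.map (fun w => [w]) = D.keys.flatMap (fun w => pvCompl D 0 w) := by
      show _ = D.keys.flatMap (fun w => [[w]])
      rw [← List.map_eq_flatMap]
    have hrlen : (PySem.List.pyRange 0 (PySem.List.len ws - 1) 1).length = m := by
      rw [PySem.List.length_pyRange_one]
      simp only [PySem.List.len_eq, hlen]
      omega
    rw [hseeds, pv_rounds D _ 0 D.keys, hrlen]
    have hA : D.keys.foldl (fun coll w => searchSentence w [] (PySem.List.len ws) D coll) PySem.Set.empty
        = D.keys.foldl (fun coll w =>
            ((pvCompl D m w).map (fun p => PySem.Str.join " " ([] ++ p))).foldl PySem.Set.add coll) PySem.Set.empty := by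
      apply List.foldl_ext
      intro coll w _
      apply pv_searchSentence_eq
      simp only [PySem.List.len_eq, hlen, List.length_nil]
      push_cast
      omega
    rw [hA, ← pv_foldl_flatMap]
    rw [PySem.Set.ofList_eq_foldl, List.map_flatMap]
    simp only [List.nil_append, Nat.zero_add]
    rfl

-- ===== VERDICT (by name: the statement is the Claim_ definition above) =====
theorem mutateSentences_spec : Claim_equal_mutateSentences := by
  intro sentence _
  unfold Spec_mutateSentences
  show (pvDA (PySem.Str.split₀ sentence)).keys.foldl
      (fun coll w => searchSentence w [] (PySem.List.len (PySem.Str.split₀ sentence)) (pvDA (PySem.Str.split₀ sentence)) coll)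
      PySem.Set.empty
    = PySem.Set.ofList
        (((PySem.List.pyRange 0 (PySem.List.len (PySem.Str.split₀ sentence) - 1) 1).foldl (fun fr _ =>
            fr.flatMap (fun p =>
              match PySem.List.pyGet? p (-1) with
              | some u => ((pvDB (PySem.Str.split₀ sentence)).getD u PySem.Set.empty).map (fun v => p ++ [v])
              | none => [])) ((pvDB (PySem.Str.split₀ sentence)).keys.map (fun w => [w]))).map
          (fun p => PySem.Str.join " " p))
  rw [pv_dicts_eq]
  apply pv_sides
  intro h
  rw [h]
  rfl
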